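-- pv_equiv track=rewrite | github.com/aleksandre-svg/GOAhomeworks | level 45/homework/hw4.py | small_enough
-- ===== SOURCE A (Python) =====
-- def small_enough(array, limit):
--     n = 0
--     for i in array:
--         if i > limit:
--             n +=1
--     if n >= 1:
--         return False
--     else:
--         return True
-- ===== SOURCE B (Python) =====
-- def small_enough(array, limit):
--     return max(array, default=limit) <= limit
-- ===== Notes on version B (the rewrite author's own statement) =====
-- stated objective: simpler
-- what changed: Replaced the per-element violation-counting loop and count comparison with a single aggregate: compute the maximum (defaulting to limit for an empty array) and compare it once against limit.
import Mathlib
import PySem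

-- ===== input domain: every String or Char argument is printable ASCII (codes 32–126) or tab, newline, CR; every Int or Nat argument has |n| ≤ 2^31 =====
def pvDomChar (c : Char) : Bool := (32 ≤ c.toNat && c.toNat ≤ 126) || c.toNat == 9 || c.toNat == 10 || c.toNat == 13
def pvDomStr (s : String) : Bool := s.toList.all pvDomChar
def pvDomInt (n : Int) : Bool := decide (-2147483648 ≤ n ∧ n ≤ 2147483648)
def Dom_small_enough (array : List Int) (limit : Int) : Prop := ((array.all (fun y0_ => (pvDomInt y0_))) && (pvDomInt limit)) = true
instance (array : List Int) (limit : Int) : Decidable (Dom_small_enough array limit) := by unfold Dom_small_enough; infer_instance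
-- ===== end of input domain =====

-- B replaces A's violation-counting loop by a single aggregate (running max, default = limit) compared once against limit; simpler, same O(n) cost.

-- ===== PORT A =====
-- n = 0; for i in array: if i > limit: n += 1; return False if n >= 1 else True
def small_enough (array : List Int) (limit : Int) : Bool :=
  let n := array.foldl (fun n i => if i > limit then n + 1 else n) (0 : Int)
  if n ≥ 1 then false else true

-- ===== PORT B =====
-- return max(array, default=limit) <= limit
def small_enough_alt (array : List Int) (limit : Int) : Bool :=
  decide (PySem.List.maxD array (fun x => x) limit ≤ limit)

-- ===== PRECONDITION & SPEC =====
def Spec_small_enough (array : List Int) (limit : Int) (out : Bool) : Prop := out = small_enough_alt array limit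
instance (array : List Int) (limit : Int) (out : Bool) : Decidable (Spec_small_enough array limit out) := by unfold Spec_small_enough; infer_instance

-- ===== CLAIM (what is proved, stated in full; the proofs are below) =====
def Claim_equal_small_enough : Prop := ∀ (array : List Int) (limit : Int), Dom_small_enough array limit → Spec_small_enough array limit (small_enough array limit)

-- ===== LEMMAS AND PROOFS =====

-- A's counter stays at its start value iff no element exceeds limit (and never decreases).
lemma countA_acc (array : List Int) (limit : Int) (acc : Int) :
    acc ≤ array.foldl (fun n i => if i > limit then n + 1 else n) acc ∧
    (array.foldl (fun n i => if i > limit then n + 1 else n) acc = acc ↔ ∀ x ∈ array, x ≤ limit) := by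
  induction array generalizing acc with
  | nil => simp
  | cons x t ih =>
    simp only [List.foldl_cons, List.mem_cons]
    by_cases hx : x > limit
    · simp only [if_pos hx]
      obtain ⟨hle, _⟩ := ih (acc + 1)
      constructor
      · omega
      · constructor
        · intro h; omega
        · intro h; exact absurd hx (not_lt.mpr (h x (Or.inl rfl)))
    · simp only [if_neg hx]
      obtain ⟨hle, hiff⟩ := ih acc
      refine ⟨hle, ?_⟩
      rw [hiff]
      constructor
      · intro h x' hx'
        rcases hx' with rfl | hm
        · exact not_lt.mp hx
        · exact h x' hm
      · intro h x' hm; exact h x' (Or.inr hm)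

lemma A_true_iff (array : List Int) (limit : Int) :
    small_enough array limit = true ↔ ∀ x ∈ array, x ≤ limit := by
  unfold small_enough
  obtain ⟨hle, hiff⟩ := countA_acc array limit 0
  simp only []
  split_ifs with h
  · simp only [false_iff]
    intro hall
    have := hiff.mpr hall
    omega
  · simp only [true_iff]
    exact hiff.mp (by omega)

lemma B_true_iff (array : List Int) (limit : Int) :
    small_enough_alt array limit = true ↔ ∀ x ∈ array, x ≤ limit := by
  unfold small_enough_alt
  rw [decide_eq_true_iff]
  cases array with
  | nil => simp [PySem.List.maxD, PySem.List.max?]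
  | cons x t =>
    rw [show PySem.List.maxD (x :: t) (fun x => x) limit = t.foldl max x by
      simp [PySem.List.maxD, PySem.List.max?_id_cons]]
    constructor
    · intro h y hy
      obtain ⟨h1, h2⟩ := PySem.List.le_foldl_max t x
      rcases List.mem_cons.mp hy with rfl | hm
      · exact le_trans h1 h
      · exact le_trans (h2 y hm) h
    · intro h
      rcases PySem.List.foldl_max_mem t x with he | he
      · rw [he]; exact h x (List.mem_cons_self ..)
      · exact h _ (List.mem_cons_of_mem _ he)

-- ===== VERDICT (by name: the statement is the Claim_ definition above) =====
theorem small_enough_spec : Claim_equal_small_enough := by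
  intro array limit _
  unfold Spec_small_enough
  rcases hb : small_enough_alt array limit with _ | _
  · rcases ha : small_enough array limit with _ | _
    · rfl
    · exact absurd ((B_true_iff array limit).mpr ((A_true_iff array limit).mp ha))
        (by simp [hb])
  · exact (A_true_iff array limit).mpr ((B_true_iff array limit).mp hb)
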